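-- pv_equiv track=rewrite | github.com/lindsay-lew/lindsay-lew.github.io | topic06/markdown_compiler_quiz_practice.py | compile_italic_star
-- ===== SOURCE A (Python) =====
-- def compile_italic_star(line):
--     result = ''
--     i = 0
--     while i < len(line):
--         if line[i] == '*':
--             end = line.find('*', i+1)
--             if end != -1:
--                 result += '<i>' + line[i+1:end] + '</i>'
--                 i = end + 1
--             else:
--                 i = len(line)
--         else:
--             result += line[i]
--             i += 1
--     return result
-- ===== SOURCE B (Python) =====
-- def compile_italic_star(line):
--     parts = line.split('*')
--     out = []
--     for i, part in enumerate(parts):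
--         if i % 2 == 0:
--             out.append(part)
--         elif i != len(parts) - 1:
--             out.append('<i>' + part + '</i>')
--         # odd-indexed last part: text after an unmatched '*', discarded (as A does)
--     return ''.join(out)
-- ===== Notes on version B (the rewrite author's own statement) =====
-- stated objective: idiomatic
-- what changed: B splits the line on '*' once and rejoins: even-indexed parts verbatim, odd-indexed parts wrapped in <i></i>, an unmatched trailing odd part dropped; A runs an index-based while loop with repeated find and repeated string concatenation.
import Mathlib
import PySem

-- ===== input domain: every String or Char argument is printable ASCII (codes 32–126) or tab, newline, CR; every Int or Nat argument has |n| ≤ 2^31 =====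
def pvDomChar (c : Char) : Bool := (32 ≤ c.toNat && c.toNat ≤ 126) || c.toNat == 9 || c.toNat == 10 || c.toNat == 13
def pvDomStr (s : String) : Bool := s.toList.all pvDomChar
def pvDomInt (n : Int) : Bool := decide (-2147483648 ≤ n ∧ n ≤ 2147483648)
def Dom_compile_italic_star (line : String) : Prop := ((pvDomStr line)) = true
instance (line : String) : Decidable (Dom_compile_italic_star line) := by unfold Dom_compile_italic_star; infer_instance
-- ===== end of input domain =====

-- B replaces A's index-based while loop (a find for each closing '*') by one split on '*'
-- and a parity-based rejoin; an idiomatic restructuring, same return value on all inputs.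


-- ===== PORT A =====
-- line.find('*', i+1) together with the two slices line[i+1:end] and line[end+1:],
-- as the obvious scan over the remaining characters (find = -1 ↦ none; exact)
def aFind : List Char → Option (List Char × List Char)
  | [] => none
  | c :: cs =>
    if c = '*' then some ([], cs)
    else (aFind cs).map (fun p => (c :: p.1, p.2))

-- termination lemma for aGo (cited by its decreasing_by)
theorem aFind_length : ∀ (cs seg rest : List Char),
    aFind cs = some (seg, rest) → rest.length < cs.length := by
  intro cs
  induction cs with
  | nil => intro seg rest h; simp [aFind] at h
  | cons c cs ih =>
    intro seg rest h
    by_cases hc : c = '*'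
    · simp [aFind, hc] at h
      simp [← h.2]
    · simp only [aFind, if_neg hc] at h
      cases hres : aFind cs with
      | none => rw [hres] at h; simp at h
      | some p =>
        rw [hres] at h
        simp at h
        have := ih p.1 p.2 (by rw [hres])
        have h2 : p.2 = rest := h.2
        simp [← h2]
        omega

-- A's while loop; the state is the suffix of the line from index i
def aGo : List Char → List Char
  | [] => []
  | c :: cs =>
    if c = '*' then
      match h : aFind cs with
      | some (seg, rest) => "<i>".toList ++ seg ++ "</i>".toList ++ aGo rest
      | none => []
    else c :: aGo cs
termination_by cs => cs.length
decreasing_by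
  · exact Nat.lt_trans (aFind_length cs seg rest h) (by simp)
  · simp

def compile_italic_star (line : String) : String := String.ofList (aGo line.toList)

-- ===== PORT B =====
-- line.split('*'), ported by hand (exact for the one-character separator '*')
def bSplit : List Char → List (List Char)
  | [] => [[]]
  | c :: cs =>
    if c = '*' then [] :: bSplit cs
    else
      match bSplit cs with
      | [] => [[c]]        -- unreachable: bSplit never returns []
      | p :: ps => (c :: p) :: ps

-- the for-loop over enumerate(parts): i is the index; 'ps.isEmpty' ↔ i = len(parts) - 1
def bJoin : Nat → List (List Char) → List Char
  | _, [] => []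
  | i, p :: ps =>
    (if i % 2 == 0 then p
     else if ps.isEmpty then []
     else "<i>".toList ++ p ++ "</i>".toList) ++ bJoin (i + 1) ps

def compile_italic_star_alt (line : String) : String :=
  String.ofList (bJoin 0 (bSplit line.toList))

-- ===== PRECONDITION & SPEC =====
def Spec_compile_italic_star (line : String) (out : String) : Prop := out = compile_italic_star_alt line
instance (line : String) (out : String) : Decidable (Spec_compile_italic_star line out) := by unfold Spec_compile_italic_star; infer_instance

-- ===== CLAIM (what is proved, stated in full; the proofs are below) =====
def Claim_equal_compile_italic_star : Prop := ∀ (line : String), Dom_compile_italic_star line → Spec_compile_italic_star line (compile_italic_star line)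

-- ===== LEMMAS AND PROOFS =====
theorem aGo_nil : aGo [] = [] := by rw [aGo]

theorem aGo_cons_ne (c : Char) (cs : List Char) (hc : ¬ c = '*') :
    aGo (c :: cs) = c :: aGo cs := by
  rw [aGo, if_neg hc]

theorem aGo_star_some (cs seg rest : List Char) (hf : aFind cs = some (seg, rest)) :
    aGo ('*' :: cs) = "<i>".toList ++ seg ++ "</i>".toList ++ aGo rest := by
  rw [aGo, if_pos rfl]
  split
  · rename_i s r heq
    rw [hf] at heq
    cases heq
    rfl
  · rename_i heq
    rw [hf] at heq
    cases heq

theorem aGo_star_none (cs : List Char) (hf : aFind cs = none) :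
    aGo ('*' :: cs) = [] := by
  rw [aGo, if_pos rfl]
  split
  · rename_i s r heq
    rw [hf] at heq
    cases heq
  · rfl

theorem bSplit_ne_nil (cs : List Char) : bSplit cs ≠ [] := by
  cases cs with
  | nil => simp [bSplit]
  | cons c cs =>
    by_cases hc : c = '*'
    · simp [bSplit, hc]
    · simp only [bSplit, if_neg hc]
      cases bSplit cs <;> simp

theorem bJoin_parity : ∀ (ps : List (List Char)) (i j : Nat),
    i % 2 = j % 2 → bJoin i ps = bJoin j ps := by
  intro ps
  induction ps with
  | nil => intro i j _; rfl
  | cons p ps ih =>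
    intro i j h
    simp only [bJoin, h]
    rw [ih (i + 1) (j + 1) (by omega)]

theorem aFind_none_split (cs : List Char) (h : aFind cs = none) : bSplit cs = [cs] := by
  induction cs with
  | nil => rfl
  | cons c cs ih =>
    by_cases hc : c = '*'
    · simp [aFind, hc] at h
    · simp only [aFind, if_neg hc, Option.map_eq_none_iff] at h
      simp [bSplit, hc, ih h]

theorem aFind_some_split : ∀ (cs seg rest : List Char),
    aFind cs = some (seg, rest) → bSplit cs = seg :: bSplit rest := by
  intro cs
  induction cs with
  | nil => intro seg rest h; simp [aFind] at h
  | cons c cs ih =>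
    intro seg rest h
    by_cases hc : c = '*'
    · simp [aFind, hc] at h
      simp [bSplit, hc, h.1, h.2]
    · simp only [aFind, if_neg hc] at h
      cases hres : aFind cs with
      | none => rw [hres] at h; simp at h
      | some p =>
        rw [hres] at h
        simp at h
        have hsp := ih p.1 p.2 (by rw [hres])
        have h1 : c :: p.1 = seg := h.1
        have h2 : p.2 = rest := h.2
        simp only [bSplit, if_neg hc, hsp, ← h1, ← h2]

theorem aGo_eq_bJoin : ∀ (n : Nat) (cs : List Char), cs.length ≤ n →
    aGo cs = bJoin 0 (bSplit cs) := by
  intro n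
  induction n with
  | zero =>
    intro cs h
    have : cs = [] := by cases cs <;> simp_all
    subst this
    simp [aGo_nil, bSplit, bJoin]
  | succ n ih =>
    intro cs hlen
    cases cs with
    | nil => simp [aGo_nil, bSplit, bJoin]
    | cons c cs =>
      by_cases hc : c = '*'
      · subst hc
        rw [show bSplit ('*' :: cs) = [] :: bSplit cs from by simp [bSplit]]
        cases hf : aFind cs with
        | none =>
          rw [aGo_star_none cs hf, aFind_none_split cs hf]
          simp [bJoin]
        | some pr =>
          obtain ⟨seg, rest⟩ := pr
          rw [aGo_star_some cs seg rest hf, aFind_some_split cs seg rest hf]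
          have hlt := aFind_length cs seg rest hf
          have hrest : aGo rest = bJoin 0 (bSplit rest) := by
            apply ih; simp at hlen; omega
          simp only [bJoin]
          rw [bJoin_parity (bSplit rest) 2 0 (by omega)]
          simp [bSplit_ne_nil rest, hrest]
      · rw [aGo_cons_ne c cs hc]
        have hcs : aGo cs = bJoin 0 (bSplit cs) := by
          apply ih; simp at hlen; omega
        simp only [bSplit, if_neg hc]
        cases hb : bSplit cs with
        | nil => exact absurd hb (bSplit_ne_nil cs)
        | cons p ps =>
          rw [hb] at hcs
          simp [bJoin, hcs]

-- ===== VERDICT (by name: the statement is the Claim_ definition above) =====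
theorem compile_italic_star_spec : Claim_equal_compile_italic_star := by
  intro line _
  unfold Spec_compile_italic_star compile_italic_star compile_italic_star_alt
  exact congrArg String.ofList (aGo_eq_bJoin line.toList.length line.toList le_rfl)
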